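-- pv_equiv track=rewrite | github.com/mackadrian/MRU-python | Assignment 4/tests.py | get_stone_score
-- ===== SOURCE A (Python) =====
-- def get_stone_score(levels) -> int:
--     """
--     Calculates the score of stone dice.
--     """
--     score = 0
--     for row in range(len(levels)):
--         for column in range(len(levels[row])):
--             if ("S" in levels[row][column]) and (row == 0):
--                 score += 2
--             elif ("S" in levels[row][column]) and (row == 1):
--                 score += 3
--             elif ("S" in levels[row][column]) and (row == 2):
--                 score += 5
--             elif ("S" in levels[row][column]) and (row >= 3):
--                 score += 8
--     return score
-- ===== SOURCE B (Python) =====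
-- def get_stone_score(levels) -> int:
--     """Layered scoring: each stone in rows >= k earns an extra increment
--     (2 for k=0, +1 for k=1, +2 for k=2, +3 for k=3), so the total is a
--     weighted sum of plain stone counts over four row suffixes."""
--     def stones(rows):
--         return sum(1 for cells in rows for cell in cells if "S" in cell)
--     return (2 * stones(levels)
--             + 1 * stones(levels[1:])
--             + 2 * stones(levels[2:])
--             + 3 * stones(levels[3:]))
-- ===== Notes on version B (the rewrite author's own statement) =====
-- stated objective: alternative
-- what changed: Replaces A's per-cell four-branch weighted accumulation with a layered/telescoping scheme: one uniform un-weighted stone counter applied to four row suffixes (levels, levels[1:], levels[2:], levels[3:]) combined as 2*t0+t1+2*t2+3*t3, exploiting weight(row)=2+[row>=1]+2[row>=2]+3[row>=3]; no row index or per-row weight is ever computed.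
import Mathlib
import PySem

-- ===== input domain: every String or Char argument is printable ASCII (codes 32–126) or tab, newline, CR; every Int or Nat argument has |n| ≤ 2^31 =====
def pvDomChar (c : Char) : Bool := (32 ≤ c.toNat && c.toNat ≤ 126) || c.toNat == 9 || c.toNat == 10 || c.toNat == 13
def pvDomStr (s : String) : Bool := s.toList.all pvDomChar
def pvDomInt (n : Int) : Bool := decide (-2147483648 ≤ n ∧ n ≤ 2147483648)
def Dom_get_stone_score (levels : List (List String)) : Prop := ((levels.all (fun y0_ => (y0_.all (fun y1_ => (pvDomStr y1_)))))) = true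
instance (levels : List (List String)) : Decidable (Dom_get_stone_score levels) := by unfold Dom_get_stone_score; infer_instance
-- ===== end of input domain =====

-- B replaces A's per-cell four-branch weighted accumulation with a layered scheme:
-- one uniform un-weighted stone counter over four row suffixes, combined as
-- 2*t0 + t1 + 2*t2 + 3*t3 (objective: alternative; same cost).

-- ===== PORT A =====
-- inner loop: for column in range(len(levels[row])): branch cascade on the cell
def pvCellsA (row : Int) : List String → Int → Int
  | [], score => score
  | c :: cs, score =>
    pvCellsA row cs
      (if PySem.Str.isIn "S" c && row == 0 then score + 2
       else if PySem.Str.isIn "S" c && row == 1 then score + 3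
       else if PySem.Str.isIn "S" c && row == 2 then score + 5
       else if PySem.Str.isIn "S" c && decide (3 ≤ row) then score + 8
       else score)

-- outer loop: for row in range(len(levels))
def pvRowsA : List (List String) → Int → Int → Int
  | [], _, score => score
  | cells :: rest, row, score => pvRowsA rest (row + 1) (pvCellsA row cells score)

def get_stone_score (levels : List (List String)) : Int :=
  pvRowsA levels 0 0

-- ===== PORT B =====
-- stones(rows) = sum(1 for cells in rows for cell in cells if "S" in cell)
def pvStones (rows : List (List String)) : Int :=
  ((rows.flatMap (fun cells => cells)).countP (fun cell => PySem.Str.isIn "S" cell) : Int)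

def get_stone_score_alt (levels : List (List String)) : Int :=
  2 * pvStones levels
    + 1 * pvStones (levels.drop 1)
    + 2 * pvStones (levels.drop 2)
    + 3 * pvStones (levels.drop 3)

-- ===== PRECONDITION & SPEC =====
def Spec_get_stone_score (levels : List (List String)) (out : Int) : Prop := out = get_stone_score_alt levels
instance (levels : List (List String)) (out : Int) : Decidable (Spec_get_stone_score levels out) := by unfold Spec_get_stone_score; infer_instance

-- ===== CLAIM (what is proved, stated in full; the proofs are below) =====
def Claim_equal_get_stone_score : Prop := ∀ (levels : List (List String)), Dom_get_stone_score levels → Spec_get_stone_score levels (get_stone_score levels)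

-- ===== LEMMAS AND PROOFS =====

def pvCnt (cs : List String) : Int :=
  (cs.countP (fun cell => PySem.Str.isIn "S" cell) : Int)

theorem pvStones_cons (a : List String) (t : List (List String)) :
    pvStones (a :: t) = pvCnt a + pvStones t := by
  simp [pvStones, pvCnt, List.countP_append]

theorem pvCells0 (cs : List String) (score : Int) :
    pvCellsA 0 cs score = score + 2 * pvCnt cs := by
  induction cs generalizing score with
  | nil => simp [pvCellsA, pvCnt]
  | cons c cs ih =>
    rw [pvCellsA, ih]
    simp only [pvCnt, List.countP_cons,
      show ((0 : Int) == 0) = true by decide, show ((0 : Int) == 1) = false by decide,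
      show ((0 : Int) == 2) = false by decide, show (decide ((3 : Int) ≤ 0)) = false by decide,
      Bool.and_true, Bool.and_false, Bool.false_eq_true, if_false]
    by_cases h : PySem.Str.isIn "S" c = true <;> simp only [h, if_true] <;>
      push_cast <;> ring

theorem pvCells1 (cs : List String) (score : Int) :
    pvCellsA 1 cs score = score + 3 * pvCnt cs := by
  induction cs generalizing score with
  | nil => simp [pvCellsA, pvCnt]
  | cons c cs ih =>
    rw [pvCellsA, ih]
    simp only [pvCnt, List.countP_cons,
      show ((1 : Int) == 0) = false by decide, show ((1 : Int) == 1) = true by decide,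
      show ((1 : Int) == 2) = false by decide, show (decide ((3 : Int) ≤ 1)) = false by decide,
      Bool.and_true, Bool.and_false, Bool.false_eq_true, if_false]
    by_cases h : PySem.Str.isIn "S" c = true <;> simp only [h, if_true] <;>
      push_cast <;> ring

theorem pvCells2 (cs : List String) (score : Int) :
    pvCellsA 2 cs score = score + 5 * pvCnt cs := by
  induction cs generalizing score with
  | nil => simp [pvCellsA, pvCnt]
  | cons c cs ih =>
    rw [pvCellsA, ih]
    simp only [pvCnt, List.countP_cons,
      show ((2 : Int) == 0) = false by decide, show ((2 : Int) == 1) = false by decide,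
      show ((2 : Int) == 2) = true by decide, show (decide ((3 : Int) ≤ 2)) = false by decide,
      Bool.and_true, Bool.and_false, Bool.false_eq_true, if_false]
    by_cases h : PySem.Str.isIn "S" c = true <;> simp only [h, if_true] <;>
      push_cast <;> ring

theorem pvCells3 (row : Int) (hrow : 3 ≤ row) (cs : List String) (score : Int) :
    pvCellsA row cs score = score + 8 * pvCnt cs := by
  have e0 : (row == 0) = false := by simp; omega
  have e1 : (row == 1) = false := by simp; omega
  have e2 : (row == 2) = false := by simp; omega
  have e3 : (decide (3 ≤ row)) = true := by simp [hrow]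
  induction cs generalizing score with
  | nil => simp [pvCellsA, pvCnt]
  | cons c cs ih =>
    rw [pvCellsA, ih]
    simp only [pvCnt, List.countP_cons, e0, e1, e2, e3,
      Bool.and_true, Bool.and_false, Bool.false_eq_true, if_false]
    by_cases h : PySem.Str.isIn "S" c = true <;> simp only [h, if_true] <;>
      push_cast <;> ring

theorem pvRows3 (ls : List (List String)) (row score : Int) (hrow : 3 ≤ row) :
    pvRowsA ls row score = score + 8 * pvStones ls := by
  induction ls generalizing row score with
  | nil => simp [pvRowsA, pvStones]
  | cons a t ih =>
    rw [pvRowsA, ih (row + 1) _ (by omega), pvCells3 row hrow, pvStones_cons]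
    ring

-- ===== VERDICT (by name: the statement is the Claim_ definition above) =====
theorem get_stone_score_spec : Claim_equal_get_stone_score := by
  intro levels _
  unfold Spec_get_stone_score get_stone_score get_stone_score_alt
  match levels with
  | [] => simp [pvRowsA, pvStones]
  | [a] =>
    simp only [pvRowsA]
    norm_num [pvCells0, pvStones_cons, pvStones, pvCnt]
  | [a, b] =>
    simp only [pvRowsA]
    norm_num [pvCells0, pvCells1, pvStones_cons, pvStones, pvCnt]
    ring
  | a :: b :: c :: rest =>
    simp only [pvRowsA]
    norm_num [pvCells0, pvCells1, pvCells2, pvRows3 rest 3, pvStones_cons, pvCnt, List.drop]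
    ring
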